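-- pv_equiv track=rewrite | github.com/hierynomus/code-challenges | 2015-adventofcode.com/day11.py | has_two_in_row
-- ===== SOURCE A (Python) =====
-- def has_two_in_row(password):
--     ch = password[0]
--     found = set()
--     for c in password[1:]:
--         if c == ch:
--             found.add(c)
--         else:
--             ch = c
--
--     return len(found) > 1
-- ===== SOURCE B (Python) =====
-- def has_two_in_row(password):
--     # Run-based scan: collect characters whose maximal run is >= 2.
--     doubled = set()
--     i, n = 0, len(password)
--     while i < n:
--         j = i + 1
--         while j < n and password[j] == password[i]:
--             j += 1
--         if j - i >= 2:
--             doubled.add(password[i])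
--         i = j
--     return len(doubled) > 1
-- ===== Notes on version B (the rewrite author's own statement) =====
-- stated objective: alternative
-- what changed: B partitions the password into maximal runs of equal characters with an index-jumping outer loop and collects the characters of runs of length >= 2, instead of A's per-character fold that compares each character with the previous one; B needs no prev-char state.
import Mathlib
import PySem

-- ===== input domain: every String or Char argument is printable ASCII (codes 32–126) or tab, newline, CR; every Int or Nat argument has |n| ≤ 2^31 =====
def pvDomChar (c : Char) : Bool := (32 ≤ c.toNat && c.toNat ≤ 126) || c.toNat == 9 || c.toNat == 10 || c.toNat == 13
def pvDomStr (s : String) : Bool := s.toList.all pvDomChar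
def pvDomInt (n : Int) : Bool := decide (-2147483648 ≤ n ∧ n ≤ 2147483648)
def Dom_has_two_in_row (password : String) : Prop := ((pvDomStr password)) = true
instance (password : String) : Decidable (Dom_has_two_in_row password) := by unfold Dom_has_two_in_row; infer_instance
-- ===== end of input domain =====

-- B replaces A's per-character previous-comparison fold by an index-jumping scan over maximal
-- runs of equal characters (objective: alternative decomposition, same O(n) cost).


-- ===== PORT A =====
-- ch = password[0]; found = set(); for c in password[1:]: …; return len(found) > 1
def has_two_in_row (password : String) : Bool :=
  match password.toList with
  | [] => false  -- password[0] raises IndexError here; excluded by Pre_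
  | ch :: rest =>
    let st := rest.foldl
      (fun (s : Char × PySem.Set Char) c => if c == s.1 then (s.1, s.2.add c) else (c, s.2))
      (ch, PySem.Set.empty)
    decide (PySem.Set.len st.2 > 1)

-- ===== PORT B =====
-- outer loop of Source B: consume one maximal run of equal characters per step
def pvBRun : List Char → PySem.Set Char → PySem.Set Char
  | [], acc => acc
  | c :: t, acc =>
    pvBRun (t.dropWhile (· == c)) (if t.head? == some c then acc.add c else acc)
termination_by l _ => l.length
decreasing_by
  simpa using Nat.lt_succ_of_le (List.length_dropWhile_le _ _)

def has_two_in_row_alt (password : String) : Bool :=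
  decide (PySem.Set.len (pvBRun password.toList PySem.Set.empty) > 1)

-- ===== PRECONDITION & SPEC =====
-- Pre_ excludes only the empty string, on which A raises IndexError (password[0]).
def Pre_has_two_in_row (password : String) : Prop := password ≠ ""
instance (password : String) : Decidable (Pre_has_two_in_row password) := by
  unfold Pre_has_two_in_row; infer_instance
def pvWitness_has_two_in_row : String := "aabb"

def Spec_has_two_in_row (password : String) (out : Bool) : Prop := out = has_two_in_row_alt password
instance (password : String) (out : Bool) : Decidable (Spec_has_two_in_row password out) := by
  unfold Spec_has_two_in_row; infer_instance

-- ===== CLAIM (what is proved, stated in full; the proofs are below) =====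
def Claim_equal_has_two_in_row : Prop := ∀ (password : String), Dom_has_two_in_row password → Pre_has_two_in_row password → Spec_has_two_in_row password (has_two_in_row password)

-- ===== LEMMAS AND PROOFS =====

-- consuming one more copy of ch at the head is the same as having recorded it already
theorem pvBRun_dup (ch : Char) (rest : List Char) (found : PySem.Set Char) :
    pvBRun (ch :: ch :: rest) found = pvBRun (ch :: rest) (found.add ch) := by
  cases rest with
  | nil => simp [pvBRun]
  | cons d r =>
    by_cases hd : d = ch
    · subst hd
      rw [pvBRun, pvBRun]
      simp [List.dropWhile]
    · rw [pvBRun, pvBRun]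
      simp [List.dropWhile, hd]

-- A's fold over the tail, started with previous character ch, computes exactly
-- B's run scan over ch :: tail.
theorem pvKey (l : List Char) : ∀ (ch : Char) (found : PySem.Set Char),
    (l.foldl
      (fun (s : Char × PySem.Set Char) c => if c == s.1 then (s.1, s.2.add c) else (c, s.2))
      (ch, found)).2 = pvBRun (ch :: l) found := by
  induction l with
  | nil => intro ch found; simp [pvBRun]
  | cons c rest ih =>
    intro ch found
    by_cases hc : c = ch
    · subst hc
      simp only [List.foldl_cons, BEq.rfl, if_pos]
      rw [ih, pvBRun_dup]
    · simp only [List.foldl_cons]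
      rw [if_neg (by simp [hc])]
      rw [ih]
      conv_rhs => rw [pvBRun]
      simp [List.dropWhile, beq_eq_false_iff_ne.mpr hc]

-- ===== VERDICT (by name: the statement is the Claim_ definition above) =====
theorem has_two_in_row_spec : Claim_equal_has_two_in_row := by
  intro password _ hpre
  unfold Spec_has_two_in_row has_two_in_row has_two_in_row_alt
  cases hl : password.toList with
  | nil => exact absurd (String.toList_eq_nil_iff.mp hl) hpre
  | cons ch rest =>
    exact congrArg (fun s => decide (PySem.Set.len s > 1)) (pvKey rest ch PySem.Set.empty)
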